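-- pv_equiv track=rewrite | github.com/Amegonzale/IIC2233-2023-1 | Tareas/T0/functions.py | verificar_celdas_tapadas
-- ===== SOURCE A (Python) =====
-- def get_coordinates(tablero: list) -> list:
--     '''
--     La siguiente funcion tiene las coordenadas
--     de todas las bombas que hay en el tablero,
--     es una lista de tuplas
--     '''
--     coordenadas_bombas = []
--     for i in range(len(tablero)):
--         for j in range(len(tablero)):
--             if tablero[i][j] != 'T' and tablero[i][j] != '-':
--                 coordenadas_bombas.append((i, j))
--     return coordenadas_bombas
--
-- def verificar_celdas_tapadas(tablero: list) -> bool: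
--     '''
--     La funcion chequea si hay un elemento T
--     en la celda y ve si existe otro elemento
--     mas en la misma celda (bomba)
--     '''
--     coordenadas = get_coordinates(tablero)
--     tapado = False
--     for coordenada in coordenadas:
--         i = coordenada[0]
--         j = coordenada[1]
--         if 'T' in tablero[i][j] and '-' not in tablero[i][j] and len(tablero[i][j]) == 2:
--             tapado = True
--     return tapado
-- ===== SOURCE B (Python) =====
-- def verificar_celdas_tapadas(tablero: list) -> bool:
--     n = len(tablero)
--     return any('T' in tablero[i][j]
--                and '-' not in tablero[i][j]
--                and len(tablero[i][j]) == 2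
--                for i in range(n) for j in range(n))
-- ===== Notes on version B (the rewrite author's own statement) =====
-- stated objective: simpler
-- what changed: Drops the get_coordinates helper and its intermediate coordinate list entirely: one fused short-circuiting any() over the n x n index grid (the coordinate-filter test is redundant because a cell equal to 'T' or '-' can never satisfy the covered-bomb test).
import Mathlib
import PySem

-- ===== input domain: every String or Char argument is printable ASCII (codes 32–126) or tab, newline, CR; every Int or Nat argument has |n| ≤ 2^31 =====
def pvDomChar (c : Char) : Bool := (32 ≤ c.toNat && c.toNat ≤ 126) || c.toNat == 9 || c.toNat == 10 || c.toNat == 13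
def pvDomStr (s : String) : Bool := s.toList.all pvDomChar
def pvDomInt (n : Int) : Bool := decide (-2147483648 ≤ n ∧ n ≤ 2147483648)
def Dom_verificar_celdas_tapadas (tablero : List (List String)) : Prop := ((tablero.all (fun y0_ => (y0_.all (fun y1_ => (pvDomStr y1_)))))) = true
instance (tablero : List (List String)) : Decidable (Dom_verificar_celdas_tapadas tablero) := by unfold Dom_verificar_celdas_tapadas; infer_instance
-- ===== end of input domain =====

-- B drops the get_coordinates helper and its intermediate coordinate list in favour of
-- one fused short-circuiting any() over the index grid (objective: simpler).

-- ===== PORT A =====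
def get_coordinates (tablero : List (List String)) : List (Int × Int) :=
  (PySem.List.pyRange 0 (tablero.length : Int) 1).foldl (fun acc i =>
    (PySem.List.pyRange 0 (tablero.length : Int) 1).foldl (fun acc j =>
      if (PySem.List.pyGetD (PySem.List.pyGetD tablero i []) j "" != "T") &&
         (PySem.List.pyGetD (PySem.List.pyGetD tablero i []) j "" != "-")
      then acc ++ [(i, j)] else acc) acc) []

def verificar_celdas_tapadas (tablero : List (List String)) : Bool :=
  (get_coordinates tablero).foldl (fun tapado coordenada =>
    if PySem.Str.isIn "T" (PySem.List.pyGetD (PySem.List.pyGetD tablero coordenada.1 []) coordenada.2 "") &&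
       !(PySem.Str.isIn "-" (PySem.List.pyGetD (PySem.List.pyGetD tablero coordenada.1 []) coordenada.2 "")) &&
       (PySem.Str.len (PySem.List.pyGetD (PySem.List.pyGetD tablero coordenada.1 []) coordenada.2 "") == 2)
    then true else tapado) false

-- ===== PORT B =====
def verificar_celdas_tapadas_alt (tablero : List (List String)) : Bool :=
  let n : Int := tablero.length
  (PySem.List.pyRange 0 n 1).any (fun i =>
    (PySem.List.pyRange 0 n 1).any (fun j =>
      PySem.Str.isIn "T" (PySem.List.pyGetD (PySem.List.pyGetD tablero i []) j "") &&
      !(PySem.Str.isIn "-" (PySem.List.pyGetD (PySem.List.pyGetD tablero i []) j "")) &&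
      (PySem.Str.len (PySem.List.pyGetD (PySem.List.pyGetD tablero i []) j "") == 2)))

-- ===== PRECONDITION & SPEC =====
-- Pre_ excludes ragged boards with a row shorter than the row count, on which the Python A
-- (and B) raise IndexError when indexing tablero[i][j] for j in range(len(tablero)).
def Pre_verificar_celdas_tapadas (tablero : List (List String)) : Prop :=
  ∀ row ∈ tablero, tablero.length ≤ row.length
instance (tablero : List (List String)) : Decidable (Pre_verificar_celdas_tapadas tablero) := by
  unfold Pre_verificar_celdas_tapadas; infer_instance

def pvWitness_verificar_celdas_tapadas : List (List String) := [["T.", "-"], ["X", "T"]]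

def Spec_verificar_celdas_tapadas (tablero : List (List String)) (out : Bool) : Prop := out = verificar_celdas_tapadas_alt tablero
instance (tablero : List (List String)) (out : Bool) : Decidable (Spec_verificar_celdas_tapadas tablero out) := by unfold Spec_verificar_celdas_tapadas; infer_instance

-- ===== CLAIM (what is proved, stated in full; the proofs are below) =====
def Claim_equal_verificar_celdas_tapadas : Prop := ∀ (tablero : List (List String)), Dom_verificar_celdas_tapadas tablero → Pre_verificar_celdas_tapadas tablero → Spec_verificar_celdas_tapadas tablero (verificar_celdas_tapadas tablero)

-- ===== LEMMAS AND PROOFS =====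

-- A's 'tapado = True' loop is an any over the coordinate list.
theorem foldl_if_true_eq_or_any {γ : Type} (p : γ → Bool) :
    ∀ (L : List γ) (b : Bool),
      L.foldl (fun t c => if p c then true else t) b = (b || L.any p) := by
  intro L
  induction L with
  | nil => simp
  | cons x xs ih =>
      intro b
      simp only [List.foldl_cons, List.any_cons]
      rw [show (if p x = true then true else b) = (b || p x) by cases p x <;> simp]
      rw [ih, Bool.or_assoc]

-- The covered-bomb test already rules out the cells get_coordinates filters away.
theorem filter_test_redundant (s : String) :
    (s != "T" && s != "-" &&
      (PySem.Str.isIn "T" s && !PySem.Str.isIn "-" s && PySem.Str.len s == 2)) =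
    (PySem.Str.isIn "T" s && !PySem.Str.isIn "-" s && PySem.Str.len s == 2) := by
  by_cases hT : s = "T"
  · subst hT; decide
  · by_cases hD : s = "-"
    · subst hD; decide
    · have h1 : (s != "T") = true := by simp [hT]
      have h2 : (s != "-") = true := by simp [hD]
      rw [h1, h2]; simp

theorem verificar_celdas_tapadas_eq_alt (tablero : List (List String)) :
    verificar_celdas_tapadas tablero = verificar_celdas_tapadas_alt tablero := by
  unfold verificar_celdas_tapadas verificar_celdas_tapadas_alt get_coordinates
  rw [foldl_if_true_eq_or_any]
  simp only [PySem.List.foldl_append_if, PySem.List.foldl_append_eq_flatMap,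
    List.nil_append, List.any_flatMap, List.any_map, List.any_filter, Bool.false_or,
    Function.comp_def, filter_test_redundant]

-- ===== VERDICT (by name: the statement is the Claim_ definition above) =====
theorem verificar_celdas_tapadas_spec : Claim_equal_verificar_celdas_tapadas := by
  intro tablero _ _
  unfold Spec_verificar_celdas_tapadas
  exact verificar_celdas_tapadas_eq_alt tablero
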